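-- pv_equiv track=rewrite | github.com/hep-gc/cloudscheduler | condor_data_collectors/db_cscollector.py | trim_keys
-- ===== SOURCE A (Python) =====
-- def trim_keys(dict_to_trim, key_list):
--     keys_to_trim = []
--     for key in dict_to_trim:
--         if key not in key_list:
--             keys_to_trim.append(key)
--     for key in keys_to_trim:
--         dict_to_trim.pop(key, None)
--     return dict_to_trim
-- ===== SOURCE B (Python) =====
-- def trim_keys(dict_to_trim, key_list):
--     kept = {k: v for k, v in dict_to_trim.items() if k in key_list}
--     dict_to_trim.clear()
--     dict_to_trim.update(kept)
--     return dict_to_trim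
-- ===== Notes on version B (the rewrite author's own statement) =====
-- stated objective: simpler
-- what changed: Instead of collecting the complement of key_list and popping each of those keys from the dict, B builds the kept mapping in one comprehension and overwrites the dict's contents with clear()+update(), keeping object identity and order.
import Mathlib
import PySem

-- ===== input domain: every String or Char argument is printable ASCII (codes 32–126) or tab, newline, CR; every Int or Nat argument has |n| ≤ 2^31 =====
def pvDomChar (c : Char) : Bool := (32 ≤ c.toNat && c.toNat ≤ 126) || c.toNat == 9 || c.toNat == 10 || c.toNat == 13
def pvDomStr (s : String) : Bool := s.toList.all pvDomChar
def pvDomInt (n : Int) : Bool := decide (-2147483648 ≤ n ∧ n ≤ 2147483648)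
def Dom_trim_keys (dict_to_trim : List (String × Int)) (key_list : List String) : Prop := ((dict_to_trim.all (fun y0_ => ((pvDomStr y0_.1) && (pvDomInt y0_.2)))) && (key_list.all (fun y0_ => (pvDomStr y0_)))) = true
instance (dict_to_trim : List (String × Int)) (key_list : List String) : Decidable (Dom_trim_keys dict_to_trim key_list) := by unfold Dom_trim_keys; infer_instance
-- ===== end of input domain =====

-- B replaces A's "collect the complement then pop each key" with one construction of the
-- kept mapping followed by clear()+update(); return values proved equal (both versions also
-- mutate the argument dict in place, which is outside the return-value equivalence proved here).

-- ===== PORT A =====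
-- first loop: keys_to_trim = keys of the dict not in key_list, in iteration order
-- second loop: pop each such key from the dict (on the assoc list: remove its entries)
def trim_keys (dict_to_trim : List (String × Int)) (key_list : List String) : List (String × Int) :=
  let keys_to_trim :=
    dict_to_trim.foldl (fun acc p => if key_list.contains p.1 then acc else acc ++ [p.1]) []
  keys_to_trim.foldl (fun cur k => cur.filter (fun p => !(p.1 == k))) dict_to_trim

-- ===== PORT B =====
-- kept = {k: v for k, v in dict_to_trim.items() if k in key_list}; clear()+update(kept) leaves exactly kept
def trim_keys_alt (dict_to_trim : List (String × Int)) (key_list : List String) : List (String × Int) :=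
  dict_to_trim.filter (fun p => key_list.contains p.1)

-- ===== PRECONDITION & SPEC =====
def Spec_trim_keys (dict_to_trim : List (String × Int)) (key_list : List String) (out : List (String × Int)) : Prop := out = trim_keys_alt dict_to_trim key_list
instance (dict_to_trim : List (String × Int)) (key_list : List String) (out : List (String × Int)) : Decidable (Spec_trim_keys dict_to_trim key_list out) := by unfold Spec_trim_keys; infer_instance

-- ===== CLAIM (what is proved, stated in full; the proofs are below) =====
def Claim_equal_trim_keys : Prop := ∀ (dict_to_trim : List (String × Int)) (key_list : List String), Dom_trim_keys dict_to_trim key_list → Spec_trim_keys dict_to_trim key_list (trim_keys dict_to_trim key_list)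

-- ===== LEMMAS AND PROOFS =====

-- membership in the first loop's accumulator
theorem mem_keys_to_trim (key_list : List String) (d : List (String × Int)) (acc : List String) (x : String) :
    (x ∈ d.foldl (fun acc p => if key_list.contains p.1 then acc else acc ++ [p.1]) acc
      ↔ x ∈ acc ∨ (x ∈ d.map Prod.fst ∧ key_list.contains x = false)) := by
  induction d generalizing acc with
  | nil => simp
  | cons hd tl ih =>
      simp only [List.foldl_cons]
      rw [ih]
      by_cases h : key_list.contains hd.1 = true
      · simp only [if_pos h, List.map_cons, List.mem_cons]
        constructor
        · rintro (ha | ⟨hm, hc⟩)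
          · exact Or.inl ha
          · exact Or.inr ⟨Or.inr hm, hc⟩
        · rintro (ha | ⟨hx | hm, hc⟩)
          · exact Or.inl ha
          · subst hx; rw [h] at hc; cases hc
          · exact Or.inr ⟨hm, hc⟩
      · simp only [if_neg h, List.mem_append, List.map_cons, List.mem_cons]
        constructor
        · rintro ((ha | hx | hnil) | ⟨hm, hc⟩)
          · exact Or.inl ha
          · subst hx; exact Or.inr ⟨Or.inl rfl, Bool.eq_false_iff.mpr h⟩
          · cases hnil
          · exact Or.inr ⟨Or.inr hm, hc⟩
        · rintro (ha | ⟨hx | hm, hc⟩)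
          · exact Or.inl (Or.inl ha)
          · exact Or.inl (Or.inr (Or.inl hx))
          · exact Or.inr ⟨hm, hc⟩

-- the second loop: successively filtering out each key of ks equals one filter by non-membership
theorem foldl_filter_eq (ks : List String) (d : List (String × Int)) :
    ks.foldl (fun cur k => cur.filter (fun p => !(p.1 == k))) d
      = d.filter (fun p => !(ks.contains p.1)) := by
  induction ks generalizing d with
  | nil => simp
  | cons k ks ih =>
      simp only [List.foldl_cons, ih, List.filter_filter]
      apply List.filter_congr
      intro p _
      by_cases h : p.1 = k
      · subst h; simp
      · simp [h]

theorem trim_keys_spec : Claim_equal_trim_keys := by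
  intro d kl _
  show trim_keys d kl = trim_keys_alt d kl
  unfold trim_keys trim_keys_alt
  rw [foldl_filter_eq]
  apply List.filter_congr
  intro p hp
  have hmem : ∀ x : String,
      (x ∈ d.foldl (fun acc p => if kl.contains p.1 then acc else acc ++ [p.1]) [])
        ↔ (x ∈ d.map Prod.fst ∧ kl.contains x = false) := by
    intro x
    rw [mem_keys_to_trim]
    simp
  by_cases h : kl.contains p.1 = true
  · have hout : (d.foldl (fun acc p => if kl.contains p.1 then acc else acc ++ [p.1]) []).contains p.1 = false := by
      rw [Bool.eq_false_iff]
      intro hc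
      have hm := (hmem p.1).mp (by simpa using hc)
      rw [h] at hm
      exact absurd hm.2 (by simp)
    rw [hout, h]
    rfl
  · have hf : kl.contains p.1 = false := Bool.eq_false_iff.mpr h
    have hin : (d.foldl (fun acc p => if kl.contains p.1 then acc else acc ++ [p.1]) []).contains p.1 = true := by
      have : p.1 ∈ d.foldl (fun acc p => if kl.contains p.1 then acc else acc ++ [p.1]) [] :=
        (hmem p.1).mpr ⟨List.mem_map.mpr ⟨p, hp, rfl⟩, hf⟩
      simpa using this
    rw [hin, hf]
    rfl
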